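/- GENERATED by farm/mkstatement.py from design/units.tsv (unit `vorbis_alloc`) and the Specs of Vorbis/Spec/*.lean — do not edit.
   THE STATEMENT of the proof unit `vorbis_alloc`: the function `vorbis_alloc` (5 instructions) satisfies its contract,
   given the contracts of its callees. What the names mean: Vorbis/Spec/Basic.lean. The theorem to prove:
   `theorem vorbis_alloc_ok : Vorbis.Spec.vorbis_alloc.Statement`. -/
import Vorbis.Spec.Alloc
namespace Vorbis.Spec.vorbis_alloc
open X86 X86.User Asan

/-- The statement of unit `vorbis_alloc`. -/
def Statement : Prop :=
  ∀ (Lay : Layout) (_hLay : Lay.hi = 0x1000000) (μ : Microarch) (_hμ : UserX.MicroOK μ) (u₀ : State)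
    (_hcode : HasCodeNat Lay u₀ Vorbis.L.vorbis_alloc.entry Vorbis.Code.code_vorbis_alloc.nat Vorbis.L.vorbis_alloc.size)
    (_h_setup_malloc : ∀ (others : List Obj) (frames : List (Nat × FrameLayout)) (A : Arena), Calls Lay μ Vorbis.WayInv (Vorbis.conv u₀) Vorbis.L.setup_malloc.entry (Vorbis.Spec.setup_malloc.spec others frames A)),
    ∀ (others : List Obj) (frames : List (Nat × FrameLayout)) (A : Arena), Calls Lay μ Vorbis.WayInv (Vorbis.conv u₀) Vorbis.L.vorbis_alloc.entry (Vorbis.Spec.vorbis_alloc.spec others frames A)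

end Vorbis.Spec.vorbis_alloc
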